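-- pv_equiv track=rewrite | github.com/vbhunor/nhackathon-tak-early-2025-megoldas | signals/main.py | decode_signals
-- ===== SOURCE A (Python) =====
-- from collections import defaultdict
-- from typing import Dict, List, Tuple
--
-- def decode_signals(data: List[Tuple[List[str], List[str]]]) -> Dict[str, str]:
--     # Lehetséges események halmaza kódonként
--     possible = defaultdict(set)
--     all_codes = set()
--
--     # Egyes napok adatai alapján szűkítjük a kódokhoz tartozó eseményeket
--     for codes, events in data:
--         for code in codes:
--             if code not in possible:
--                 possible[code] = set(events)
--             else:
--                 possible[code] &= set(events)
--         all_codes.update(codes)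
--
--     decoded: Dict[str, str] = {}
--     max_iter = 1000
--     iter_count = 0
--
--     # Kódok megfejtése addig, amíg van változás vagy el nem fogy a lehetőség
--     while len(decoded) < len(all_codes) and iter_count < max_iter:
--         progress = False
--         for code, events_set in possible.items():
--             if code in decoded:
--                 continue
--             # Kiszűrjük már kiosztott eseményeket
--             events_set -= set(decoded.values())
--             if len(events_set) == 1:
--                 decoded[code] = events_set.pop()
--                 progress = True
--         if not progress:
--             break
--         iter_count += 1
--
--     return decoded
-- ===== SOURCE B (Python) =====
-- def decode_signals(data):
--     # group: for each distinct code, the list of day event-lists it appears with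
--     groups = {}
--     for codes, events in data:
--         for c in dict.fromkeys(codes):
--             groups.setdefault(c, []).append(events)
--     # candidate events per code: ordered intersection of its day event-lists
--     cand = {}
--     for c, days in groups.items():
--         s = list(dict.fromkeys(days[0]))
--         for d in days[1:]:
--             dset = set(d)
--             s = [e for e in s if e in dset]
--         cand[c] = s
--     # inverted index: event -> codes whose candidate list contains it
--     index = {}
--     for c, s in cand.items():
--         for e in s:
--             index.setdefault(e, []).append(c)
--     # elimination: when a code resolves, push the removal of its event to the
--     # affected codes only (via the index), instead of subtracting used events on every visit
--     decoded = {}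
--     pending = list(cand)
--     for _ in range(1000):
--         progress = False
--         remaining = []
--         for c in pending:
--             s = cand[c]
--             if len(s) == 1:
--                 e = s[0]
--                 decoded[c] = e
--                 progress = True
--                 for c2 in index.pop(e, []):
--                     if c2 != c and e in cand[c2]:
--                         cand[c2].remove(e)
--             else:
--                 remaining.append(c)
--         pending = remaining
--         if not progress:
--             break
--     return decoded
-- ===== Notes on version B (the rewrite author's own statement) =====
-- stated objective: alternative
-- what changed: B builds a one-pass inverted index event->codes and, when a code resolves, pushes the removal of that single event only to the codes the index names (dropping resolved codes from a shrinking pending list), instead of A's pull-based sweeps that revisit every code and rebuild set(decoded.values()) and re-subtract it from the candidate set on each visit; the push-based propagation trades the index-building pass for cheaper sweeps.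
import Mathlib
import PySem

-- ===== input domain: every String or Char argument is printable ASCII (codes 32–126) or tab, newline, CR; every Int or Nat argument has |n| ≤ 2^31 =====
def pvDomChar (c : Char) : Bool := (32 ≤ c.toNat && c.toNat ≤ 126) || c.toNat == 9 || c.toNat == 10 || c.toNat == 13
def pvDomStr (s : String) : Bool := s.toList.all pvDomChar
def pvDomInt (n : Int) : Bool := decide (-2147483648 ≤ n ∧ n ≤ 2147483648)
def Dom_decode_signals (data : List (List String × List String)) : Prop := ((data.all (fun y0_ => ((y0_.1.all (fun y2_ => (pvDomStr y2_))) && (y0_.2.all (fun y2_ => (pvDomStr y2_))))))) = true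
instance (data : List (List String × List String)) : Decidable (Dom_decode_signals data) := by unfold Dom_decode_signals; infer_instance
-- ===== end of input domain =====

-- B propagates push-based through a one-pass inverted index event → codes: when a code resolves,
-- the removal of that single event goes only to the codes the index names (undecoded codes stay
-- on a shrinking pending list), instead of A's pull-based sweeps that revisit every code and
-- rebuild and re-subtract set(decoded.values()) on each visit; same return value, proved below.

-- ===== PORT A =====
-- inner statement 'if code not in possible: possible[code] = set(events) else: possible[code] &= set(events)'
def pvCodeStepA (ev : PySem.Set String) (p : PySem.Dict String (PySem.Set String)) (code : String) :
    PySem.Dict String (PySem.Set String) :=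
  if !(p.contains code) then p.insert code ev else p.insert code (PySem.Set.inter (p.getD code []) ev)

-- one day of A's first loop: the inner 'for code in codes' and the trailing 'all_codes.update(codes)'
def pvDayStepA (st : PySem.Dict String (PySem.Set String) × PySem.Set String)
    (cd : List String × List String) : PySem.Dict String (PySem.Set String) × PySem.Set String :=
  (cd.1.foldl (pvCodeStepA (PySem.Set.ofList cd.2)) st.1, PySem.Set.update st.2 cd.1)

-- one code of A's decoding sweep (state: possible, decoded, progress);
-- on a singleton the element is popped into decoded, leaving the stored set empty
def pvStepA (st : PySem.Dict String (PySem.Set String) × PySem.Dict String String × Bool)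
    (kv : String × PySem.Set String) :
    PySem.Dict String (PySem.Set String) × PySem.Dict String String × Bool :=
  if st.2.1.contains kv.1 then st
  else
    let s' := PySem.Set.diff kv.2 (PySem.Set.ofList st.2.1.values)
    if s'.length = 1 then (st.1.insert kv.1 [], st.2.1.insert kv.1 (s'.headD ""), true)
    else (st.1.insert kv.1 s', st.2.1, st.2.2)

-- A's while loop ('iter_count < max_iter' = the fuel; 'if not progress: break')
def pvLoopA (p : PySem.Dict String (PySem.Set String)) (dec : PySem.Dict String String)
    (total : Nat) : Nat → PySem.Dict String String
  | 0 => dec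
  | f + 1 =>
    if dec.size < total then
      let r := p.items.foldl pvStepA (p, dec, false)
      if r.2.2 then pvLoopA r.1 r.2.1 total f else r.2.1
    else dec

def decode_signals (data : List (List String × List String)) : List (String × String) :=
  let st := data.foldl pvDayStepA (PySem.Dict.empty, PySem.Set.empty)
  (pvLoopA st.1 PySem.Dict.empty st.2.length 1000).items

-- ===== PORT B =====
-- 'for c in dict.fromkeys(codes): groups.setdefault(c, []).append(events)'
def pvDayStepB (g : PySem.Dict String (List (List String))) (cd : List String × List String) :
    PySem.Dict String (List (List String)) :=
  (PySem.List.dedup cd.1).foldl (fun g c => g.modify c [] (· ++ [cd.2])) g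

-- 's = list(dict.fromkeys(days[0])); for d in days[1:]: s = [e for e in s if e in set(d)]'
def pvInterDays (days : List (List String)) : PySem.Set String :=
  (days.drop 1).foldl (fun s d => s.filter (fun e => (PySem.Set.ofList d).contains e))
    (PySem.List.dedup (days.headD []))

-- the 'cand' dict: candidate events per code
def pvCandB (data : List (List String × List String)) : PySem.Dict String (PySem.Set String) :=
  (data.foldl pvDayStepB PySem.Dict.empty).items.foldl
    (fun cd cs => cd.insert cs.1 (pvInterDays cs.2)) PySem.Dict.empty

-- 'for c, s in cand.items(): for e in s: index.setdefault(e, []).append(c)'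
def pvIndexB (cand : PySem.Dict String (PySem.Set String)) : PySem.Dict String (List String) :=
  cand.items.foldl (fun ix cs => cs.2.foldl (fun ix e => ix.modify e [] (· ++ [cs.1])) ix)
    PySem.Dict.empty

-- 'if c2 != c and e in cand[c2]: cand[c2].remove(e)'
def pvRemoveStep (c e : String) (cd : PySem.Dict String (PySem.Set String)) (c2 : String) :
    PySem.Dict String (PySem.Set String) :=
  if c2 ≠ c ∧ (cd.getD c2 []).contains e then
    cd.modify c2 [] (fun t => (PySem.List.remove? t e).getD t)
  else cd

-- one pending code of B's pass (state: cand, index, decoded, remaining, progress);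
-- on a singleton, 'index.pop(e, [])' drives the removal of e from the affected codes only
def pvStepB (st : PySem.Dict String (PySem.Set String) × PySem.Dict String (List String) ×
      PySem.Dict String String × List String × Bool) (c : String) :
    PySem.Dict String (PySem.Set String) × PySem.Dict String (List String) ×
      PySem.Dict String String × List String × Bool :=
  let s := st.1.getD c []
  if s.length = 1 then
    let e := s.headD ""
    ((st.2.1.getD e []).foldl (pvRemoveStep c e) st.1, st.2.1.erase e,
      st.2.2.1.insert c e, st.2.2.2.1, true)
  else (st.1, st.2.1, st.2.2.1, st.2.2.2.1 ++ [c], st.2.2.2.2)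

-- B's 'for _ in range(1000)' pass loop over the shrinking pending list
def pvLoopB (pending : List String) (cand : PySem.Dict String (PySem.Set String))
    (ix : PySem.Dict String (List String)) (dec : PySem.Dict String String) :
    Nat → PySem.Dict String String
  | 0 => dec
  | f + 1 =>
    let r := pending.foldl pvStepB (cand, ix, dec, [], false)
    if r.2.2.2.2 then pvLoopB r.2.2.2.1 r.1 r.2.1 r.2.2.1 f else r.2.2.1

def decode_signals_alt (data : List (List String × List String)) : List (String × String) :=
  let cand := pvCandB data
  let ix := pvIndexB cand
  (pvLoopB cand.keys cand ix PySem.Dict.empty 1000).items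

-- ===== PRECONDITION & SPEC =====
def Spec_decode_signals (data : List (List String × List String)) (out : List (String × String)) : Prop := out = decode_signals_alt data
instance (data : List (List String × List String)) (out : List (String × String)) : Decidable (Spec_decode_signals data out) := by unfold Spec_decode_signals; infer_instance

-- ===== CLAIM (what is proved, stated in full; the proofs are below) =====
def Claim_equal_decode_signals : Prop := ∀ (data : List (List String × List String)), Dom_decode_signals data → Spec_decode_signals data (decode_signals data)

-- ===== LEMMAS AND PROOFS =====

-- ---------- phase 1: both ports build the same candidate dict ----------

-- intersection as an optional fold (the common reference for both phase-1 computations)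
def pvOptInter (o : Option (PySem.Set String)) (L : List (PySem.Set String)) : Option (PySem.Set String) :=
  L.foldl (fun o t => some (o.elim t (fun s => PySem.Set.inter s t))) o
theorem pv_inter_absorb (s t : PySem.Set String) :
    PySem.Set.inter (PySem.Set.inter s t) t = PySem.Set.inter s t := by
  simp [PySem.Set.inter, List.filter_filter]
theorem pv_inter_self (t : PySem.Set String) : PySem.Set.inter t t = t := by
  simp [PySem.Set.inter]
theorem pvOptInter_some (s : PySem.Set String) (L : List (PySem.Set String)) :
    pvOptInter (some s) L = some (L.foldl PySem.Set.inter s) := by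
  induction L generalizing s with
  | nil => rfl
  | cons h t ih => simp [pvOptInter, List.foldl_cons] at *; exact ih _

theorem pv_foldl_inter_replicate (s ev : PySem.Set String) (h : PySem.Set.inter s ev = s) (n : Nat) :
    (List.replicate n ev).foldl PySem.Set.inter s = s := by
  induction n with
  | zero => rfl
  | succ m ihm => rw [List.replicate_succ, List.foldl_cons, h]; exact ihm

theorem pvOptInter_replicate (o : Option (PySem.Set String)) (ev : PySem.Set String) (k : Nat) (hk : 0 < k) :
    pvOptInter o (List.replicate k ev) = some (o.elim ev (fun s => PySem.Set.inter s ev)) := by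
  cases k with
  | zero => omega
  | succ n =>
    rw [List.replicate_succ]
    have h1 : pvOptInter o (ev :: List.replicate n ev)
        = pvOptInter (some (o.elim ev (fun s => PySem.Set.inter s ev))) (List.replicate n ev) := rfl
    rw [h1, pvOptInter_some, pv_foldl_inter_replicate]
    cases o <;> simp [pv_inter_self, pv_inter_absorb]

theorem pvOptInter_append (o : Option (PySem.Set String)) (L1 L2 : List (PySem.Set String)) :
    pvOptInter o (L1 ++ L2) = pvOptInter (pvOptInter o L1) L2 := List.foldl_append

def pvSetsA (c : String) (data : List (List String × List String)) : List (PySem.Set String) :=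
  data.flatMap (fun cd => List.replicate (cd.1.count c) (PySem.Set.ofList cd.2))
def pvDaysB (c : String) (data : List (List String × List String)) : List (List String) :=
  data.flatMap (fun cd => if c ∈ cd.1 then [cd.2] else [])

theorem pvOptInter_setsA_eq_daysB (data : List (List String × List String)) (o : Option (PySem.Set String)) (c : String) :
    pvOptInter o (pvSetsA c data) = pvOptInter o ((pvDaysB c data).map PySem.Set.ofList) := by
  induction data generalizing o with
  | nil => rfl
  | cons cd rest ih =>
    have hA : pvSetsA c (cd :: rest) = List.replicate (cd.1.count c) (PySem.Set.ofList cd.2) ++ pvSetsA c rest := by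
      simp [pvSetsA]
    have hB : (pvDaysB c (cd :: rest)).map PySem.Set.ofList
        = (if c ∈ cd.1 then [PySem.Set.ofList cd.2] else []) ++ (pvDaysB c rest).map PySem.Set.ofList := by
      by_cases hm : c ∈ cd.1 <;> simp [pvDaysB, hm]
    rw [hA, hB, pvOptInter_append, pvOptInter_append]
    by_cases hm : c ∈ cd.1
    · have hc : 0 < cd.1.count c := List.count_pos_iff.mpr hm
      rw [if_pos hm, pvOptInter_replicate _ _ _ hc]
      have : pvOptInter o [PySem.Set.ofList cd.2] = some (o.elim (PySem.Set.ofList cd.2) (fun s => PySem.Set.inter s (PySem.Set.ofList cd.2))) := rfl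
      rw [this]; exact ih _
    · have hc : cd.1.count c = 0 := List.count_eq_zero.mpr hm
      rw [if_neg hm, hc]; exact ih _

theorem pv_get?_codeStepA (codes : List String) (ev : PySem.Set String)
    (d : PySem.Dict String (PySem.Set String)) (c : String) :
    (codes.foldl (pvCodeStepA ev) d).get? c = pvOptInter (d.get? c) (List.replicate (codes.count c) ev) := by
  induction codes generalizing d with
  | nil => rfl
  | cons a rest ih =>
    rw [List.foldl_cons, ih]
    by_cases hac : a = c
    · subst hac
      have hcnt : (a :: rest).count a = rest.count a + 1 := by simp
      rw [hcnt, List.replicate_succ]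
      have hstep : (pvCodeStepA ev d a).get? a = some ((d.get? a).elim ev (fun s => PySem.Set.inter s ev)) := by
        unfold pvCodeStepA
        by_cases hco : d.contains a
        · rw [if_neg (by simp [hco]), PySem.Dict.get?_insert_self]
          have : ∃ v, d.get? a = some v := by
            have := PySem.Dict.contains_eq_isSome_get? (d := d) (k := a)
            rw [hco] at this; cases h : d.get? a; · rw [h] at this; simp at this
            · exact ⟨_, rfl⟩
          obtain ⟨v, hv⟩ := this
          rw [hv]; simp [PySem.Dict.getD_eq_get?_getD, hv]
        · rw [if_pos (by simp [hco]), PySem.Dict.get?_insert_self]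
          have hv : d.get? a = none := by
            have := PySem.Dict.contains_eq_isSome_get? (d := d) (k := a)
            rw [Bool.eq_false_iff.mpr hco] at this
            cases h : d.get? a; · rfl
            · rw [h] at this; simp at this
          rw [hv]; rfl
      rw [hstep]
      rfl
    · have hcnt : (a :: rest).count c = rest.count c := by
        simp [hac]
      rw [hcnt]
      congr 1
      unfold pvCodeStepA
      by_cases hco : d.contains a <;>
        simp [hco, PySem.Dict.get?_insert_of_ne (hne := Ne.symm hac)]

theorem pv_get?_buildA (data : List (List String × List String)) (d : PySem.Dict String (PySem.Set String)) (c : String) :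
    (data.foldl (fun p cd => cd.1.foldl (pvCodeStepA (PySem.Set.ofList cd.2)) p) d).get? c =
      pvOptInter (d.get? c) (pvSetsA c data) := by
  induction data generalizing d with
  | nil => rfl
  | cons cd rest ih =>
    rw [List.foldl_cons, ih]
    have : pvSetsA c (cd :: rest) = List.replicate (cd.1.count c) (PySem.Set.ofList cd.2) ++ pvSetsA c rest := by
      simp [pvSetsA]
    rw [this, pvOptInter_append, pv_get?_codeStepA]

theorem pv_keys_buildA (data : List (List String × List String)) (d : PySem.Dict String (PySem.Set String)) :
    (data.foldl (fun p cd => cd.1.foldl (pvCodeStepA (PySem.Set.ofList cd.2)) p) d).keys =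
      data.foldl (fun s cd => PySem.Set.update s cd.1) d.keys := by
  induction data generalizing d with
  | nil => rfl
  | cons cd rest ih =>
    rw [List.foldl_cons, ih, List.foldl_cons]
    congr 1
    have hstep : ∀ (p : PySem.Dict String (PySem.Set String)) (code : String),
        pvCodeStepA (PySem.Set.ofList cd.2) p code
          = p.insert code (if !(p.contains code) then PySem.Set.ofList cd.2
              else PySem.Set.inter (p.getD code []) (PySem.Set.ofList cd.2)) := by
      intro p code; unfold pvCodeStepA; by_cases h : p.contains code <;> simp [h]
    calc (cd.1.foldl (pvCodeStepA (PySem.Set.ofList cd.2)) d).keys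
        = (cd.1.foldl (fun p code => p.insert code (if !(p.contains code) then PySem.Set.ofList cd.2
            else PySem.Set.inter (p.getD code []) (PySem.Set.ofList cd.2))) d).keys := by
          congr 1; exact List.foldl_ext _ _ d (fun p code _ => hstep p code)
      _ = PySem.Set.update d.keys cd.1 := PySem.Dict.keys_foldl_insert _ _ _

theorem pv_update_dedup (s : PySem.Set String) (l : List String) :
    PySem.Set.update s (PySem.List.dedup l) = PySem.Set.update s l := by
  rw [PySem.Set.update_eq_append_filter, PySem.Set.update_eq_append_filter,
    PySem.List.dedup_eq_ofList, PySem.Set.ofList_ofList]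

theorem pv_keys_groups (data : List (List String × List String)) (d : PySem.Dict String (List (List String))) :
    (data.foldl pvDayStepB d).keys = data.foldl (fun s cd => PySem.Set.update s cd.1) d.keys := by
  induction data generalizing d with
  | nil => rfl
  | cons cd rest ih =>
    rw [List.foldl_cons, ih, List.foldl_cons]
    congr 1
    unfold pvDayStepB
    rw [← pv_update_dedup]
    exact PySem.Dict.keys_foldl_modify _ _ (fun _ _ v => v ++ [cd.2]) _

theorem pv_nodup_fold_update (data : List (List String × List String)) (s : PySem.Set String) (h : s.Nodup) :
    (data.foldl (fun s cd => PySem.Set.update s cd.1) s).Nodup := by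
  induction data generalizing s with
  | nil => exact h
  | cons cd rest ih => exact ih _ (PySem.Set.nodup_update _ _ h)

theorem pv_filterflat (data : List (List String × List String)) (c : String) :
    List.map (fun x => x.2)
      (List.filter (fun p => p.1 == c)
        (List.flatMap (fun cd => List.map (fun x => (x, cd.2)) (PySem.List.dedup cd.1)) data)) =
      pvDaysB c data := by
  induction data with
  | nil => rfl
  | cons cd rest ih =>
    simp only [List.flatMap_cons, List.filter_append, List.map_append, ih, pvDaysB]
    congr 1
    rw [List.filter_map]
    have h2 : (PySem.List.dedup cd.1).filter ((fun p => p.1 == c) ∘ (fun x => (x, cd.2)))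
        = (PySem.List.dedup cd.1).filter (fun x => x == c) := by congr 1
    rw [h2, List.filter_beq]
    by_cases hm : c ∈ cd.1
    · rw [List.count_eq_one_of_mem (PySem.List.nodup_dedup _) ((PySem.List.mem_dedup _ _).mpr hm)]
      simp [hm]
    · rw [List.count_eq_zero.mpr (fun hmem => hm ((PySem.List.mem_dedup _ _).mp hmem))]
      simp [hm]

theorem pv_getD_groups (data : List (List String × List String)) (c : String) :
    (data.foldl pvDayStepB PySem.Dict.empty).getD c [] = pvDaysB c data := by
  have hflat : data.foldl pvDayStepB PySem.Dict.empty
      = (data.flatMap (fun cd => (PySem.List.dedup cd.1).map (fun x => (x, cd.2)))).foldl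
          (fun d p => d.modify p.1 [] (· ++ [p.2])) PySem.Dict.empty := by
    rw [List.foldl_flatMap]
    congr 1
    funext g cd
    rw [List.foldl_map]
    rfl
  rw [hflat, PySem.Dict.getD_foldl_modify_append]
  simp only [PySem.Dict.getD_empty, List.nil_append]
  exact pv_filterflat data c

theorem pv_interDays_eq (days : List (List String)) :
    pvInterDays days = (pvOptInter none (days.map PySem.Set.ofList)).getD [] := by
  cases days with
  | nil => rfl
  | cons d ds =>
    unfold pvInterDays
    simp only [List.drop_succ_cons, List.drop_zero, List.headD_cons, List.map_cons]
    have h1 : pvOptInter none (PySem.Set.ofList d :: ds.map PySem.Set.ofList)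
        = pvOptInter (some (PySem.Set.ofList d)) (ds.map PySem.Set.ofList) := rfl
    rw [h1, pvOptInter_some]
    have h2 : ∀ (s : PySem.Set String) (d' : List String),
        s.filter (fun e => (PySem.Set.ofList d').contains e) = PySem.Set.inter s (PySem.Set.ofList d') := by
      intro s d'; simp [PySem.Set.inter]
    rw [PySem.List.dedup_eq_ofList]
    rw [List.foldl_map]
    simp only [Option.getD_some]
    exact List.foldl_ext _ _ _ (fun s d' _ => h2 s d')

-- the A-side dict built by phase 1
def pvBuildA (data : List (List String × List String)) : PySem.Dict String (PySem.Set String) :=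
  data.foldl (fun p cd => cd.1.foldl (pvCodeStepA (PySem.Set.ofList cd.2)) p) PySem.Dict.empty

theorem pv_cand_eq_buildA (data : List (List String × List String)) :
    pvCandB data = pvBuildA data := by
  apply PySem.Dict.ext
  have hkG : (data.foldl pvDayStepB PySem.Dict.empty).keys
      = data.foldl (fun s cd => PySem.Set.update s cd.1) PySem.Set.empty := pv_keys_groups data _
  have hkA : (pvBuildA data).keys
      = data.foldl (fun s cd => PySem.Set.update s cd.1) PySem.Set.empty := pv_keys_buildA data _
  have hnd : (data.foldl (fun s cd => PySem.Set.update s cd.1) PySem.Set.empty).Nodup :=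
    pv_nodup_fold_update data _ List.nodup_nil
  have hcand : (pvCandB data).items
      = (data.foldl pvDayStepB PySem.Dict.empty).items.map (fun cs => (cs.1, pvInterDays cs.2)) := by
    unfold pvCandB
    have := PySem.Dict.items_foldl_insert_fresh
      (l := (data.foldl pvDayStepB PySem.Dict.empty).items) (k := Prod.fst)
      (v := fun cs => pvInterDays cs.2) (d := PySem.Dict.empty)
      (by intro a _; exact PySem.Dict.contains_empty _)
      (by show ((data.foldl pvDayStepB PySem.Dict.empty).keys).Nodup; rw [hkG]; exact hnd)
    simpa using this
  rw [hcand, PySem.Dict.items_eq_map_keys _ (hkG ▸ hnd) [],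
      PySem.Dict.items_eq_map_keys (pvBuildA data) (hkA ▸ hnd) ([] : PySem.Set String),
      hkG, hkA, List.map_map]
  apply List.map_congr_left
  intro c _
  simp only [Function.comp]
  congr 1
  rw [pv_getD_groups, pv_interDays_eq, PySem.Dict.getD_eq_get?_getD]
  unfold pvBuildA
  rw [pv_get?_buildA, PySem.Dict.get?_empty, pvOptInter_setsA_eq_daysB]

-- nodup of every candidate value
theorem pv_nodup_foldl_inter (t : List (PySem.Set String)) :
    ∀ (s0 : PySem.Set String), s0.Nodup → (t.foldl PySem.Set.inter s0).Nodup := by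
  induction t with
  | nil => intro s0 h0; exact h0
  | cons x xs ih =>
    intro s0 h0
    rw [List.foldl_cons]
    exact ih (PySem.Set.inter s0 x) (PySem.Set.nodup_inter _ _ h0)

theorem pv_nodup_optInter (L : List (PySem.Set String)) (h : ∀ x ∈ L, x.Nodup) :
    ((pvOptInter none L).getD []).Nodup := by
  cases L with
  | nil => exact List.nodup_nil
  | cons s t =>
    have h1 : pvOptInter none (s :: t) = pvOptInter (some s) t := rfl
    rw [h1, pvOptInter_some, Option.getD_some]
    exact pv_nodup_foldl_inter t s (h s (by simp))

theorem pv_nodup_buildA (data : List (List String × List String)) (c : String) :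
    ((pvBuildA data).getD c []).Nodup := by
  rw [PySem.Dict.getD_eq_get?_getD]
  unfold pvBuildA
  rw [pv_get?_buildA, PySem.Dict.get?_empty]
  have : (pvOptInter none (pvSetsA c data)).getD [] = ((pvOptInter none (pvSetsA c data)).getD []) := rfl
  have hmem : ∀ x ∈ pvSetsA c data, x.Nodup := by
    intro x hx
    unfold pvSetsA at hx
    obtain ⟨cd, _, hx2⟩ := List.mem_flatMap.mp hx
    rw [List.eq_of_mem_replicate hx2]
    exact PySem.Set.nodup_ofList _
  have hgen := pv_nodup_optInter (pvSetsA c data) hmem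
  cases hopt : pvOptInter none (pvSetsA c data) with
  | none => simp
  | some v => rw [hopt] at hgen; simpa using hgen

-- ---------- the inverted index ----------

theorem pv_index_getD (cand : PySem.Dict String (PySem.Set String)) (e : String) :
    (pvIndexB cand).getD e []
      = ((cand.items.flatMap (fun cs => cs.2.map (fun x => (x, cs.1)))).filter
          (fun p => p.1 == e)).map (fun p => p.2) := by
  have hflat : pvIndexB cand
      = (cand.items.flatMap (fun cs => cs.2.map (fun x => (x, cs.1)))).foldl
          (fun d p => d.modify p.1 [] (· ++ [p.2])) PySem.Dict.empty := by
    unfold pvIndexB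
    rw [List.foldl_flatMap]
    congr 1
    funext ix cs
    rw [List.foldl_map]
  rw [hflat, PySem.Dict.getD_foldl_modify_append]
  simp

theorem pv_mem_index (cand : PySem.Dict String (PySem.Set String)) (e c : String)
    (h : e ∈ cand.getD c []) : c ∈ (pvIndexB cand).getD e [] := by
  have hget : ∃ s, cand.get? c = some s ∧ e ∈ s := by
    cases hq : cand.get? c with
    | none => rw [PySem.Dict.getD_eq_get?_getD, hq] at h; simp at h
    | some s => exact ⟨s, rfl, by rw [PySem.Dict.getD_eq_get?_getD, hq] at h; simpa using h⟩
  obtain ⟨s, hq, he⟩ := hget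
  have hmem : (c, s) ∈ cand.items := PySem.Dict.mem_items_of_get?_eq_some cand hq
  rw [pv_index_getD]
  apply List.mem_map.mpr
  refine ⟨(e, c), List.mem_filter.mpr ⟨?_, by simp⟩, rfl⟩
  exact List.mem_flatMap.mpr ⟨(c, s), hmem, List.mem_map.mpr ⟨e, he, rfl⟩⟩

-- ---------- small set facts ----------

theorem pv_remove_getD_of_mem (t : List String) (e : String) (h : (t.contains e) = true) :
    (PySem.List.remove? t e).getD t = t.erase e := by
  have hm : e ∈ t := by simpa using h
  have : PySem.List.remove? t e
      = match t.idxOf? e with | none => none | some i => some (t.eraseIdx i) := by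
    simp [PySem.List.remove?]
    cases hh : t.idxOf? e <;> simp
  rw [this, List.erase_eq_eraseIdx]
  have hnn : t.idxOf? e ≠ none := by
    simp [List.idxOf?_eq_none_iff]; exact hm
  cases hh : t.idxOf? e
  · exact absurd hh hnn
  · simp

theorem pv_diff_snoc (x : PySem.Set String) (u : List String) (e : String) :
    PySem.Set.diff x (u ++ [e]) = (PySem.Set.diff x u).filter (fun y => !(y == e)) := by
  simp only [PySem.Set.diff, List.filter_filter]
  apply List.filter_congr
  intro y _
  by_cases h1 : y ∈ u <;> by_cases h2 : y = e <;> simp [h1, h2]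

theorem pv_diff_diff (x : PySem.Set String) (u : List String) :
    PySem.Set.diff (PySem.Set.diff x u) u = PySem.Set.diff x u := by
  simp only [PySem.Set.diff, List.filter_filter]
  apply List.filter_congr
  intro y _
  by_cases h1 : y ∈ u <;> simp [h1]

theorem pv_filter_idem (t : List String) (f : String → Bool) :
    (t.filter f).filter f = t.filter f := by
  rw [List.filter_filter]
  apply List.filter_congr
  intro y _
  by_cases h : f y <;> simp [h]

theorem pv_getD_erase_of_ne {ν : Type} (d : PySem.Dict String ν) (k k' : String) (dflt : ν) (h : k' ≠ k) :
    (d.erase k).getD k' dflt = d.getD k' dflt := by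
  rw [PySem.Dict.getD_eq_get?_getD, PySem.Dict.getD_eq_get?_getD]
  congr 1
  simp only [PySem.Dict.erase, PySem.Dict.get?]
  rw [List.find?_filter]
  have hfun : (fun (a : String × ν) => decide ((!(a.1 == k)) = true ∧ (a.1 == k') = true))
      = (fun (p : String × ν) => p.1 == k') := by
    funext a; by_cases ha : a.1 = k' <;> simp [ha, h]
  rw [hfun]

-- the discard fold: e is removed from exactly the listed codes other than c
theorem pv_fold_remove_getD (cs : List String) :
    ∀ (cd : PySem.Dict String (PySem.Set String)) (c e c' : String),
    (∀ x, (cd.getD x []).Nodup) →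
    (cs.foldl (pvRemoveStep c e) cd).getD c' [] =
      if c' ≠ c ∧ c' ∈ cs then (cd.getD c' []).filter (fun y => !(y == e)) else cd.getD c' [] := by
  induction cs with
  | nil => intro cd c e c' _; simp
  | cons c2 tail ih =>
    intro cd c e c' hnd
    rw [List.foldl_cons]
    have hstep : ∀ x, (pvRemoveStep c e cd c2).getD x [] =
        if x = c2 ∧ c2 ≠ c then (cd.getD x []).filter (fun y => !(y == e)) else cd.getD x [] := by
      intro x
      unfold pvRemoveStep
      split_ifs with hg hx hx
      · obtain ⟨hx1, hx2⟩ := hx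
        subst hx1
        rw [PySem.Dict.getD_modify_self, pv_remove_getD_of_mem _ _ hg.2,
          (hnd x).erase_eq_filter e]
        apply List.filter_congr; intro y _; simp [bne]
      · rcases hx' : decide (x = c2) with _ | _
        · have : x ≠ c2 := by simpa using hx'
          rw [PySem.Dict.getD_modify_of_ne]
          exact this
        · have hx1 : x = c2 := by simpa using hx'
          have : ¬ (c2 ≠ c) := fun hc => hx ⟨hx1, hc⟩
          subst hx1
          exact absurd hg.1 this
      · -- guard failed but x = c2 ≠ c : e not in the set, filter is the identity
        obtain ⟨hx1, hx2⟩ := hx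
        subst hx1
        have he : ¬ ((cd.getD x []).contains e = true) := fun hc => hg ⟨hx2, hc⟩
        have : ∀ y ∈ cd.getD x [], (!(y == e)) = true := by
          intro y hy
          have : y ≠ e := by rintro rfl; exact he (by simpa using hy)
          simp [this]
        rw [List.filter_eq_self.mpr this]
      · rfl
    have hnd1 : ∀ x, ((pvRemoveStep c e cd c2).getD x []).Nodup := by
      intro x; rw [hstep]
      split_ifs
      · exact (hnd x).filter _
      · exact hnd x
    rw [ih _ c e c' hnd1]
    by_cases h1 : c' ≠ c
    · by_cases h2 : c' ∈ tail
      · rw [if_pos ⟨h1, h2⟩, if_pos ⟨h1, by simp [h2]⟩, hstep]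
        split_ifs with h3
        · exact pv_filter_idem _ _
        · rfl
      · by_cases h3 : c' = c2
        · subst h3
          rw [if_neg (by simp [h2]), hstep, if_pos ⟨rfl, h1⟩, if_pos ⟨h1, by simp⟩]
        · rw [if_neg (by simp [h2]), hstep, if_neg (by simp [h3]),
            if_neg (by rintro ⟨_, hm⟩; rcases List.mem_cons.mp hm with h | h; exact h3 h; exact h2 h)]
    · rw [if_neg (by simp [h1]), if_neg (by simp [h1]), hstep, if_neg (by rintro ⟨h4, h5⟩; subst h4; exact h1 h5)]

theorem pv_items_update (l1 l2 : List (String × PySem.Set String)) (c : String) (s v : PySem.Set String)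
    (h : ((l1 ++ (c,s)::l2).map Prod.fst).Nodup) :
    (l1 ++ (c,s)::l2).map (fun q => if q.1 == c then (c,v) else q) = l1 ++ (c,v)::l2 := by
  simp only [List.map_append, List.map_cons, BEq.rfl, if_pos]
  rw [List.map_append] at h
  have h1 : ∀ q ∈ l1, q.1 ≠ c := by
    intro q hq hqc
    have : c ∈ l1.map Prod.fst := hqc ▸ List.mem_map_of_mem hq
    have hc2 : c ∈ ((c,s)::l2).map Prod.fst := by simp
    exact (List.disjoint_of_nodup_append h) this hc2
  have h2 : ∀ q ∈ l2, q.1 ≠ c := by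
    intro q hq hqc
    have hnd2 := (List.nodup_append.mp h).2.1
    simp only [List.map_cons, List.nodup_cons] at hnd2
    exact hnd2.1 (hqc ▸ List.mem_map_of_mem hq)
  have e1 : l1.map (fun q => if q.1 == c then (c,v) else q) = l1.map id :=
    List.map_congr_left (fun q hq => by simp [h1 q hq])
  have e2 : l2.map (fun q => if q.1 == c then (c,v) else q) = l2.map id :=
    List.map_congr_left (fun q hq => by simp [h2 q hq])
  rw [e1, e2, List.map_id, List.map_id]

-- ---------- one pass ----------

theorem pv_pass_rel (rest : List (String × PySem.Set String)) :
    ∀ (done : List (String × PySem.Set String))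
    (p : PySem.Dict String (PySem.Set String)) (dec : PySem.Dict String String)
    (cand : PySem.Dict String (PySem.Set String)) (ix : PySem.Dict String (List String))
    (prog : Bool) (rem : List String),
    p.items = done ++ rest →
    ((p.items.map Prod.fst).Nodup) →
    dec.keys.Nodup → dec.values.Nodup →
    (∀ c, ¬ dec.contains c = true → PySem.Set.diff (p.getD c []) dec.values = cand.getD c []) →
    (∀ c, (cand.getD c []).Nodup) →
    (∀ e, e ∉ dec.values → ∀ c, e ∈ cand.getD c [] → c ∈ ix.getD e []) →
    ∀ (rA : PySem.Dict String (PySem.Set String) × PySem.Dict String String × Bool)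
      (rB : PySem.Dict String (PySem.Set String) × PySem.Dict String (List String) ×
        PySem.Dict String String × List String × Bool),
    rA = rest.foldl pvStepA (p, dec, prog) →
    rB = ((rest.filter (fun kv => !(dec.contains kv.1))).map Prod.fst).foldl pvStepB (cand, ix, dec, rem, prog) →
    rA.2.1 = rB.2.2.1 ∧
    rA.2.2 = rB.2.2.2.2 ∧
    rA.2.1.keys.Nodup ∧ rA.2.1.values.Nodup ∧
    (∀ c, dec.contains c = true → rA.2.1.contains c = true) ∧
    (∀ c, rA.2.1.contains c = true → dec.contains c = true ∨ c ∈ rest.map Prod.fst) ∧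
    (∀ c, ¬ rA.2.1.contains c = true → PySem.Set.diff (rA.1.getD c []) rA.2.1.values = rB.1.getD c []) ∧
    (∀ c, (rB.1.getD c []).Nodup) ∧
    (∀ e, e ∉ rA.2.1.values → ∀ c, e ∈ rB.1.getD c [] → c ∈ rB.2.1.getD e []) ∧
    ∃ rest', rA.1.items = done ++ rest' ∧ rest'.map Prod.fst = rest.map Prod.fst ∧
      rB.2.2.2.1 = rem ++ (rest'.filter (fun kv => !(rA.2.1.contains kv.1))).map Prod.fst ∧
      rB.2.2.2.1.length + rA.2.1.size = rem.length + dec.size + (rest.filter (fun kv => !(dec.contains kv.1))).length := by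
  induction rest with
  | nil =>
    intro done p dec cand ix prog rem hitems hnd hdk hdv hinv1 hinv0 hinv2 rA rB hA hB
    subst hA hB
    refine ⟨rfl, rfl, hdk, hdv, fun c h => h, fun c h => Or.inl h, hinv1, hinv0, hinv2,
      [], by simpa using hitems, rfl, by simp, by simp⟩
  | cons kv tail ih =>
    intro done p dec cand ix prog rem hitems hnd hdk hdv hinv1 hinv0 hinv2 rA rB hA hB
    obtain ⟨c, s⟩ := kv
    have hcmem : c ∈ p.items.map Prod.fst := by rw [hitems]; simp
    have hcnotdone : c ∉ done.map Prod.fst := by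
      rw [hitems, List.map_append] at hnd
      intro hmem
      exact (List.disjoint_of_nodup_append hnd) hmem (by simp)
    have hcnottail : c ∉ tail.map Prod.fst := by
      rw [hitems, List.map_append] at hnd
      have := (List.nodup_append.mp hnd).2.1
      simp only [List.map_cons, List.nodup_cons] at this
      exact this.1
    by_cases hdec : dec.contains c = true
    · -- A skips; B's filter drops the head
      have hstep : pvStepA (p, dec, prog) (c, s) = (p, dec, prog) := by
        unfold pvStepA; rw [if_pos hdec]
      rw [List.foldl_cons, hstep] at hA
      rw [List.filter_cons_of_neg (by simp [hdec])] at hB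
      obtain ⟨h1, h2, h3, h4, h5, h6, h7, h8, h9, rest', e1, e2, e3, e4⟩ :=
        ih (done ++ [(c, s)]) p dec cand ix prog rem (by simpa using hitems) hnd hdk hdv
          hinv1 hinv0 hinv2 rA rB hA hB
      refine ⟨h1, h2, h3, h4, h5,
        fun k hk => (h6 k hk).imp_right (fun h => by simp only [List.map_cons]; exact List.mem_cons_of_mem _ h),
        h7, h8, h9, (c, s) :: rest', by simpa using e1, by simpa using e2, ?_, ?_⟩
      · rw [e3, List.filter_cons_of_neg (by simp [h5 c hdec])]
      · rw [List.filter_cons_of_neg (by simp [hdec])]; exact e4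
    · -- A visits c; the filtered pending list starts with c
      have hofl : PySem.Set.ofList dec.values = dec.values := PySem.Set.ofList_eq_self_of_nodup _ hdv
      have hpc : p.contains c = true := by
        have := (PySem.Dict.contains_iff_mem_keys (d := p) (k := c)).mpr
        apply this
        simpa [PySem.Dict.keys] using hcmem
      have hpgetD : p.getD c [] = s := by
        apply PySem.Dict.getD_of_mem_items
        · rw [hitems]; simp
        · exact hnd
      have hcandc : cand.getD c [] = PySem.Set.diff s dec.values := by
        rw [← hinv1 c hdec, hpgetD]
      rw [List.filter_cons_of_pos (by simp [hdec]), List.map_cons, List.foldl_cons] at hB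
      by_cases hlen : (PySem.Set.diff s dec.values).length = 1
      · -- singleton: both decode c, B pushes the removal of e through the index
        obtain ⟨e, he⟩ := List.length_eq_one_iff.mp hlen
        have henotused : e ∉ dec.values := by
          have hmem : e ∈ PySem.Set.diff s dec.values := by rw [he]; simp
          have := List.of_mem_filter hmem
          simpa using this
        have hstepA : pvStepA (p, dec, prog) (c, s) = (p.insert c [], dec.insert c e, true) := by
          show (if dec.contains c then _ else _) = _
          rw [if_neg hdec]
          show (if (PySem.Set.diff s (PySem.Set.ofList dec.values)).length = 1 then _ else _) = _
          rw [hofl, he]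
          simp
        have hstepB : pvStepB (cand, ix, dec, rem, prog) c
            = ((ix.getD e []).foldl (pvRemoveStep c e) cand, ix.erase e, dec.insert c e, rem, true) := by
          show (if (cand.getD c []).length = 1 then _ else _) = _
          rw [hcandc, he]
          simp
        rw [List.foldl_cons, hstepA] at hA
        rw [hstepB] at hB
        -- facts about dec' = dec.insert c e
        have hdecitems : (dec.insert c e).items = dec.items ++ [(c, e)] :=
          PySem.Dict.items_insert_of_not_contains _ _ (by simpa using hdec)
        have hdeckeys : (dec.insert c e).keys = dec.keys ++ [c] := by
          simp [PySem.Dict.keys, hdecitems]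
        have hdecvals : (dec.insert c e).values = dec.values ++ [e] := by
          simp [PySem.Dict.values, hdecitems]
        have hcknotin : c ∉ dec.keys := by
          intro hmem
          exact absurd ((PySem.Dict.contains_iff_mem_keys dec c).mpr hmem) hdec
        have hdk' : (dec.insert c e).keys.Nodup := by
          rw [hdeckeys, List.nodup_append]
          exact ⟨hdk, List.nodup_singleton c, by intro a ha b hb hab; rw [List.mem_singleton.mp hb] at hab; exact hcknotin (hab ▸ ha)⟩
        have hdv' : (dec.insert c e).values.Nodup := by
          rw [hdecvals, List.nodup_append]
          exact ⟨hdv, List.nodup_singleton e, by intro a ha b hb hab; rw [List.mem_singleton.mp hb] at hab; exact henotused (hab ▸ ha)⟩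
        -- p' = p.insert c []
        have hpitems : (p.insert c []).items = done ++ ((c, ([] : PySem.Set String)) :: tail) := by
          rw [PySem.Dict.items_insert_of_contains _ _ hpc, hitems]
          exact pv_items_update done tail c s [] (hitems ▸ hnd)
        have hnd' : ((p.insert c []).items.map Prod.fst).Nodup := by
          rw [hpitems]
          rw [hitems] at hnd
          simpa using hnd
        -- the new candidate dict after the pushed removal of e
        set cand' := (ix.getD e []).foldl (pvRemoveStep c e) cand with hcand'
        have hcand'getD : ∀ c'', cand'.getD c'' [] =
            if c'' ≠ c ∧ c'' ∈ ix.getD e [] then (cand.getD c'' []).filter (fun y => !(y == e))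
            else cand.getD c'' [] := fun c'' => pv_fold_remove_getD _ cand c e c'' hinv0
        have hinv0' : ∀ c'', (cand'.getD c'' []).Nodup := by
          intro c''
          rw [hcand'getD]
          split_ifs
          · exact (hinv0 c'').filter _
          · exact hinv0 c''
        have hcand'filter : ∀ c'', c'' ≠ c →
            cand'.getD c'' [] = (cand.getD c'' []).filter (fun y => !(y == e)) := by
          intro c'' hne
          rw [hcand'getD]
          by_cases hmem : c'' ∈ ix.getD e []
          · rw [if_pos ⟨hne, hmem⟩]
          · rw [if_neg (by rintro ⟨_, hm⟩; exact hmem hm)]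
            have hnotin : e ∉ cand.getD c'' [] := fun hin => hmem (hinv2 e henotused c'' hin)
            symm
            apply List.filter_eq_self.mpr
            intro y hy
            have : y ≠ e := by rintro rfl; exact hnotin hy
            simp [this]
        have hinv1' : ∀ c'', ¬ (dec.insert c e).contains c'' = true →
            PySem.Set.diff ((p.insert c []).getD c'' []) (dec.insert c e).values = cand'.getD c'' [] := by
          intro c'' hc''
          have hne : c'' ≠ c := by
            rintro rfl
            exact hc'' (by rw [PySem.Dict.contains_insert]; simp)
          have hnotdec : ¬ dec.contains c'' = true := by
            intro hcc
            exact hc'' (by rw [PySem.Dict.contains_insert]; simp [hcc])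
          rw [PySem.Dict.getD_insert, if_neg hne, hdecvals, pv_diff_snoc, hinv1 c'' hnotdec,
            hcand'filter c'' hne]
        have hinv2' : ∀ e'', e'' ∉ (dec.insert c e).values → ∀ c'',
            e'' ∈ cand'.getD c'' [] → c'' ∈ (ix.erase e).getD e'' [] := by
          intro e'' he'' c'' hin
          rw [hdecvals] at he''
          simp only [List.mem_append, List.mem_singleton, not_or] at he''
          have hin0 : e'' ∈ cand.getD c'' [] := by
            rw [hcand'getD] at hin
            split_ifs at hin
            · exact (List.mem_filter.mp hin).1
            · exact hin
          rw [pv_getD_erase_of_ne _ _ _ _ he''.2]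
          exact hinv2 e'' he''.1 c'' hin0
        -- the tail filter is unchanged by inserting c into dec
        have hfilter : tail.filter (fun kv => !((dec.insert c e).contains kv.1))
            = tail.filter (fun kv => !(dec.contains kv.1)) := by
          apply List.filter_congr
          intro kv hkv
          have : kv.1 ≠ c := by
            intro h; exact hcnottail (h ▸ List.mem_map_of_mem hkv)
          rw [PySem.Dict.contains_insert]
          simp [this]
        rw [← hfilter] at hB
        obtain ⟨h1, h2, h3, h4, h5, h6, h7, h8, h9, rest', e1, e2, e3, e4⟩ :=
          ih (done ++ [(c, [])]) (p.insert c []) (dec.insert c e) cand' (ix.erase e) true rem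
            (by simpa using hpitems) hnd' hdk' hdv' hinv1' hinv0' hinv2' rA rB hA hB
        have hmono : ∀ k, dec.contains k = true → (dec.insert c e).contains k = true := by
          intro k hk; rw [PySem.Dict.contains_insert]; simp [hk]
        refine ⟨h1, h2, h3, h4, fun k hk => h5 k (hmono k hk), ?_, h7, h8, h9, (c, []) :: rest',
          by simpa using e1, by simpa using e2, ?_, ?_⟩
        · intro k hk
          rcases h6 k hk with h | h
          · rw [PySem.Dict.contains_insert] at h
            rcases (Bool.or_eq_true _ _).mp h with h' | h'
            · exact Or.inr (by simp only [List.map_cons]; exact (eq_of_beq h') ▸ List.mem_cons_self)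
            · exact Or.inl h'
          · exact Or.inr (by simp only [List.map_cons]; exact List.mem_cons_of_mem _ h)
        · rw [e3, List.filter_cons_of_neg]
          simp only [Bool.not_eq_true']
          rw [Bool.not_eq_false]
          exact h5 c (by rw [PySem.Dict.contains_insert]; simp)
        · rw [List.filter_cons_of_pos (by simp [hdec])]
          have hsize : (dec.insert c e).size = dec.size + 1 := by
            simp [PySem.Dict.size, hdecitems]
          rw [hfilter, hsize] at e4
          simp only [List.length_cons]
          omega
      · -- not a singleton: A stores the shrunk set, B keeps c on the remaining list
        have hstepA : pvStepA (p, dec, prog) (c, s)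
            = (p.insert c (PySem.Set.diff s dec.values), dec, prog) := by
          show (if dec.contains c then _ else _) = _
          rw [if_neg hdec]
          show (if (PySem.Set.diff s (PySem.Set.ofList dec.values)).length = 1 then _ else _) = _
          rw [hofl]
          rw [if_neg hlen]
        have hstepB : pvStepB (cand, ix, dec, rem, prog) c
            = (cand, ix, dec, rem ++ [c], prog) := by
          show (if (cand.getD c []).length = 1 then _ else _) = _
          rw [hcandc]
          rw [if_neg hlen]
        rw [List.foldl_cons, hstepA] at hA
        rw [hstepB] at hB
        have hpitems : (p.insert c (PySem.Set.diff s dec.values)).items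
            = done ++ ((c, PySem.Set.diff s dec.values) :: tail) := by
          rw [PySem.Dict.items_insert_of_contains _ _ hpc, hitems]
          exact pv_items_update done tail c s _ (hitems ▸ hnd)
        have hnd' : ((p.insert c (PySem.Set.diff s dec.values)).items.map Prod.fst).Nodup := by
          rw [hpitems]
          rw [hitems] at hnd
          simpa using hnd
        have hinv1' : ∀ c'', ¬ dec.contains c'' = true →
            PySem.Set.diff ((p.insert c (PySem.Set.diff s dec.values)).getD c'' []) dec.values
              = cand.getD c'' [] := by
          intro c'' hc''
          rw [PySem.Dict.getD_insert]
          by_cases hne : c'' = c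
          · subst hne
            rw [if_pos rfl, pv_diff_diff, hcandc]
          · rw [if_neg hne]
            exact hinv1 c'' hc''
        obtain ⟨h1, h2, h3, h4, h5, h6, h7, h8, h9, rest', e1, e2, e3, e4⟩ :=
          ih (done ++ [(c, PySem.Set.diff s dec.values)]) (p.insert c (PySem.Set.diff s dec.values))
            dec cand ix prog (rem ++ [c])
            (by simpa using hpitems) hnd' hdk hdv hinv1' hinv0 hinv2 rA rB hA hB
        refine ⟨h1, h2, h3, h4, h5,
          fun k hk => (h6 k hk).imp_right (fun h => by simp only [List.map_cons]; exact List.mem_cons_of_mem _ h),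
          h7, h8, h9, (c, PySem.Set.diff s dec.values) :: rest',
          by simpa using e1, by simpa using e2, ?_, ?_⟩
        · rw [e3]
          have hkeep : rA.2.1.contains c = false := by
            cases hcc : rA.2.1.contains c
            · rfl
            · rcases h6 c hcc with h | h
              · exact absurd h hdec
              · exact absurd h hcnottail
          rw [List.filter_cons_of_pos (by simp [hkeep]), List.map_cons, List.append_assoc]
          rfl
        · rw [List.filter_cons_of_pos (by simp [hdec])]
          simp only [List.length_append, List.length_cons, List.length_nil] at e4 ⊢
          omega

theorem pv_fold_dayA (data : List (List String × List String)) :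
    data.foldl pvDayStepA (PySem.Dict.empty, PySem.Set.empty)
      = (data.foldl (fun p cd => cd.1.foldl (pvCodeStepA (PySem.Set.ofList cd.2)) p) PySem.Dict.empty,
         data.foldl (fun s cd => PySem.Set.update s cd.1) PySem.Set.empty) := by
  induction data using List.reverseRecOn with
  | nil => rfl
  | append_singleton rest cd ih => rw [List.foldl_append, ih, List.foldl_append, List.foldl_append]; rfl

-- ---------- the loop ----------

theorem pv_loop_rel (fuel : Nat) : ∀ (total : Nat) (p : PySem.Dict String (PySem.Set String))
    (dec : PySem.Dict String String) (cand : PySem.Dict String (PySem.Set String))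
    (ix : PySem.Dict String (List String)),
    ((p.items.map Prod.fst).Nodup) → dec.keys.Nodup → dec.values.Nodup →
    (∀ c, ¬ dec.contains c = true → PySem.Set.diff (p.getD c []) dec.values = cand.getD c []) →
    (∀ c, (cand.getD c []).Nodup) →
    (∀ e, e ∉ dec.values → ∀ c, e ∈ cand.getD c [] → c ∈ ix.getD e []) →
    total = p.size →
    (p.items.filter (fun kv => !(dec.contains kv.1))).length + dec.size = total →
    pvLoopA p dec total fuel =
      pvLoopB ((p.items.filter (fun kv => !(dec.contains kv.1))).map Prod.fst) cand ix dec fuel := by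
  induction fuel with
  | zero => intro total p dec cand ix _ _ _ _ _ _ _ _; rfl
  | succ f ihf =>
    intro total p dec cand ix hnd hdk hdv hinv1 hinv0 hinv2 htot hlen
    by_cases hsz : dec.size < total
    · obtain ⟨h1, h2, h3, h4, h5, h6, h7, h8, h9, rest', e1, e2, e3, e4⟩ :=
        pv_pass_rel p.items [] p dec cand ix false []
          (by simp) hnd hdk hdv hinv1 hinv0 hinv2
          (p.items.foldl pvStepA (p, dec, false))
          (((p.items.filter (fun kv => !(dec.contains kv.1))).map Prod.fst).foldl pvStepB
            (cand, ix, dec, [], false))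
          rfl rfl
      simp only [List.nil_append] at e1 e3
      set rA := p.items.foldl pvStepA (p, dec, false) with hrA
      set rB := ((p.items.filter (fun kv => !(dec.contains kv.1))).map Prod.fst).foldl pvStepB
          (cand, ix, dec, [], false) with hrB
      have hAeq : pvLoopA p dec total (f + 1)
          = if rA.2.2 then pvLoopA rA.1 rA.2.1 total f else rA.2.1 := by
        rw [pvLoopA, if_pos hsz]
      have hBeq : pvLoopB ((p.items.filter (fun kv => !(dec.contains kv.1))).map Prod.fst) cand ix dec (f + 1)
          = if rB.2.2.2.2 then pvLoopB rB.2.2.2.1 rB.1 rB.2.1 rB.2.2.1 f else rB.2.2.1 := by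
        rw [pvLoopB]
      rw [hAeq, hBeq, ← h2]
      by_cases hprog : rA.2.2
      · rw [if_pos hprog, if_pos hprog]
        have hlenmap : rest'.length = p.items.length := by
          have := congrArg List.length e2
          simpa using this
        have hnd' : (rA.1.items.map Prod.fst).Nodup := by rw [e1, e2]; exact hnd
        have htot' : total = rA.1.size := by
          simp only [PySem.Dict.size] at htot ⊢
          rw [e1, hlenmap]; exact htot
        have hlen' : (rA.1.items.filter (fun kv => !(rA.2.1.contains kv.1))).length + rA.2.1.size = total := by
          have hlen3 : rB.2.2.2.1.length = (rest'.filter (fun kv => !(rA.2.1.contains kv.1))).length := by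
            rw [e3]; simp
          have e4' : rB.2.2.2.1.length + rA.2.1.size
              = dec.size + (p.items.filter (fun kv => !(dec.contains kv.1))).length := by
            simpa using e4
          rw [e1]
          omega
        have := ihf total rA.1 rA.2.1 rB.1 rB.2.1 hnd' h3 h4 h7 h8 h9 htot' hlen'
        rw [this, h1, e3, e1, ← h1]
      · rw [if_neg hprog, if_neg hprog]
        exact h1
    · have hz : (p.items.filter (fun kv => !(dec.contains kv.1))) = [] := by
        rw [← List.length_eq_zero_iff]
        omega
      have hAeq : pvLoopA p dec total (f + 1) = dec := by
        rw [pvLoopA, if_neg hsz]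
      rw [hAeq, hz]
      rfl

-- ===== VERDICT (by name: the statement is the Claim_ definition above) =====
theorem decode_signals_spec : Claim_equal_decode_signals := by
  intro data _
  show decode_signals data = decode_signals_alt data
  unfold decode_signals decode_signals_alt
  rw [pv_fold_dayA]
  show (pvLoopA (pvBuildA data) PySem.Dict.empty
      (data.foldl (fun s cd => PySem.Set.update s cd.1) PySem.Set.empty).length 1000).items
    = (pvLoopB (pvCandB data).keys (pvCandB data) (pvIndexB (pvCandB data)) PySem.Dict.empty 1000).items
  have hc : pvCandB data = pvBuildA data := pv_cand_eq_buildA data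
  have hkeys : (pvBuildA data).keys = data.foldl (fun s cd => PySem.Set.update s cd.1) PySem.Set.empty := by
    unfold pvBuildA; exact pv_keys_buildA data _
  have hknd : (pvBuildA data).keys.Nodup := by
    rw [hkeys]; exact pv_nodup_fold_update data _ List.nodup_nil
  have hfilt : (pvBuildA data).items.filter
      (fun kv => !((PySem.Dict.empty : PySem.Dict String String).contains kv.1)) = (pvBuildA data).items := by
    apply List.filter_eq_self.mpr
    intro kv _
    simp [PySem.Dict.contains_empty]
  have htot : (data.foldl (fun s cd => PySem.Set.update s cd.1) PySem.Set.empty).length = (pvBuildA data).size := by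
    rw [← hkeys]
    simp [PySem.Dict.keys, PySem.Dict.size]
  have hloop := pv_loop_rel 1000
      ((data.foldl (fun s cd => PySem.Set.update s cd.1) PySem.Set.empty).length)
      (pvBuildA data) PySem.Dict.empty (pvCandB data) (pvIndexB (pvCandB data))
      hknd List.nodup_nil List.nodup_nil
      (by
        intro c _
        rw [hc]
        show PySem.Set.diff ((pvBuildA data).getD c []) [] = (pvBuildA data).getD c []
        simp [PySem.Set.diff])
      (by intro c; rw [hc]; exact pv_nodup_buildA data c)
      (by intro e _ c hm; exact pv_mem_index _ e c hm)
      htot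
      (by
        rw [hfilt]
        show (pvBuildA data).items.length + PySem.Dict.empty.size = _
        simp only [PySem.Dict.size_empty, Nat.add_zero]
        exact htot.symm)
  rw [hloop, hfilt]
  have hpend : (pvBuildA data).items.map Prod.fst = (pvCandB data).keys := by
    rw [hc]; rfl
  rw [hpend]
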